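-- pv_equiv track=rewrite | github.com/fpganow/LabVIEW_Scripts | patchBitxfile.py | stripBitFileHeader
-- ===== SOURCE A (Python) =====
-- def stripBitFileHeader(inBitStream):
--     binStartIndex = 0
--
--     for binStartIndex in range(0, len(inBitStream) - 32):
--         allEqual = True
--         for i in range(binStartIndex, binStartIndex + 31):
--             if inBitStream[i] != 0xFF:
--                 allEqual = False
--                 break
--         if allEqual:
--             break
--     return inBitStream[binStartIndex:]
-- ===== SOURCE B (Python) =====
-- def stripBitFileHeader(inBitStream):
--     # prefix[i] = number of 0xFF bytes among the first i bytes of the stream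
--     prefix = [0]
--     for b in inBitStream:
--         prefix.append(prefix[-1] + (b == 0xFF))
--
--     binStartIndex = 0
--     for binStartIndex in range(len(inBitStream) - 32):
--         if prefix[binStartIndex + 31] - prefix[binStartIndex] == 31:
--             break
--     return inBitStream[binStartIndex:]
-- ===== Notes on version B (the rewrite author's own statement) =====
-- stated objective: alternative
-- what changed: Builds a prefix-count table of 0xFF bytes once, so each candidate position is tested with one O(1) subtraction instead of A's inner 31-byte re-scan.
import Mathlib
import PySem

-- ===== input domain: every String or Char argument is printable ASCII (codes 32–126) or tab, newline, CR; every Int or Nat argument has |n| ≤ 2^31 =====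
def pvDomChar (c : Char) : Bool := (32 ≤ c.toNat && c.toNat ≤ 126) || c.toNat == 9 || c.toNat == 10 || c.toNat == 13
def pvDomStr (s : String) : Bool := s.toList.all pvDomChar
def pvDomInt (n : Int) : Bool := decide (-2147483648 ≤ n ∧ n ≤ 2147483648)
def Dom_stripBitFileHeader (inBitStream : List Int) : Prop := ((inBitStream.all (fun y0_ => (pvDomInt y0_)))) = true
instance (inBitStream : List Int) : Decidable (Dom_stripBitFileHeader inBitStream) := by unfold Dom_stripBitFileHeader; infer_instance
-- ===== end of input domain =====

-- B builds a prefix-count table of 0xFF bytes once, replacing A's inner 31-byte window re-scan by one O(1) subtraction per candidate (objective: alternative).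

-- ===== PORT A =====
-- inner loop 'for i in range(binStartIndex, binStartIndex + 31)': sets allEqual = False and breaks
-- at the first mismatch.  Every index Python reads here is in range (s ≤ len-33, i ≤ s+30 ≤ len-3),
-- so pyGetD is exact (no IndexError is reachable).
def pvA_inner (l : List Int) : List Int → Bool
  | [] => true
  | i :: rest => if PySem.List.pyGetD l i 0 ≠ 255 then false else pvA_inner l rest

-- outer loop 'for binStartIndex in range(0, len(inBitStream) - 32)' with break; 'last' is the
-- current value of the loop variable binStartIndex (initially 0), left behind when the range ends.
def pvA_loop (l : List Int) : Int → List Int → Int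
  | last, [] => last
  | _, s :: rest =>
      if pvA_inner l (PySem.List.pyRange s (s + 31) 1) then s
      else pvA_loop l s rest

def stripBitFileHeader (inBitStream : List Int) : List Int :=
  PySem.List.slice inBitStream
    (some (pvA_loop inBitStream 0 (PySem.List.pyRange 0 (PySem.List.len inBitStream - 32) 1))) none

-- ===== PORT B =====
-- 'prefix = [0]; for b in inBitStream: prefix.append(prefix[-1] + (b == 0xFF))'
-- (prefix[-1] is the last element; 'b == 0xFF' counts 1 for True, 0 for False).
def pvPrefix (l : List Int) : List Int :=
  l.foldl (fun acc b => acc ++ [PySem.List.pyGetD acc (-1) 0 + (if b = 255 then 1 else 0)]) [0]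

-- 'for binStartIndex in range(len(inBitStream) - 32)' with break on the O(1) window test
-- 'prefix[s+31] - prefix[s] == 31'; 'last' is the leftover loop variable, as in A's outer loop.
-- Every index read is in range (0 ≤ s ≤ len-33, prefix has len+1 entries), so pyGetD is exact.
def pvB_loop (pre : List Int) : Int → List Int → Int
  | last, [] => last
  | _, s :: rest =>
      if PySem.List.pyGetD pre (s + 31) 0 - PySem.List.pyGetD pre s 0 = 31 then s
      else pvB_loop pre s rest

def stripBitFileHeader_alt (inBitStream : List Int) : List Int :=
  PySem.List.slice inBitStream
    (some (pvB_loop (pvPrefix inBitStream) 0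
      (PySem.List.pyRange 0 (PySem.List.len inBitStream - 32) 1))) none

-- ===== PRECONDITION & SPEC =====
def Spec_stripBitFileHeader (inBitStream : List Int) (out : List Int) : Prop := out = stripBitFileHeader_alt inBitStream
instance (inBitStream : List Int) (out : List Int) : Decidable (Spec_stripBitFileHeader inBitStream out) := by unfold Spec_stripBitFileHeader; infer_instance

-- ===== CLAIM (what is proved, stated in full; the proofs are below) =====
def Claim_equal_stripBitFileHeader : Prop := ∀ (inBitStream : List Int), Dom_stripBitFileHeader inBitStream → Spec_stripBitFileHeader inBitStream (stripBitFileHeader inBitStream)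

-- ===== LEMMAS AND PROOFS =====

-- proof-side spec: winF l s k = "the k bytes starting at index s are all 255"
def winF (l : List Int) : Nat → Nat → Bool
  | _, 0 => true
  | s, k + 1 => (l.getD s 0 == 255) && winF l (s + 1) k

theorem winF_iff (l : List Int) (k : Nat) : ∀ s : Nat,
    winF l s k = true ↔ ∀ j : Nat, j < k → l.getD (s + j) 0 = 255 := by
  induction k with
  | zero => intro s; simp [winF]
  | succ k ih =>
    intro s
    simp only [winF, Bool.and_eq_true, beq_iff_eq, ih (s + 1)]
    constructor
    · rintro ⟨h0, hrest⟩ j hj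
      rcases Nat.eq_zero_or_pos j with rfl | hpos
      · simpa using h0
      · have := hrest (j - 1) (by omega)
        have hje : s + 1 + (j - 1) = s + j := by omega
        rwa [hje] at this
    · intro h
      refine ⟨by simpa using h 0 (by omega), fun j hj => ?_⟩
      have := h (j + 1) (by omega)
      rwa [show s + (j + 1) = s + 1 + j by omega] at this

-- A's inner window scan computes winF
theorem pvA_inner_eq (l : List Int) (k : Nat) : ∀ s : Int, 0 ≤ s →
    pvA_inner l (PySem.List.pyRange s (s + (k : Int)) 1) = winF l s.toNat k := by
  induction k with
  | zero =>
    intro s hs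
    rw [PySem.List.pyRange_one_eq_nil (by omega)]
    rfl
  | succ k ih =>
    intro s hs
    rw [PySem.List.pyRange_one_cons (by omega)]
    simp only [pvA_inner, winF]
    have hget : PySem.List.pyGetD l s 0 = l.getD s.toNat 0 := by
      simp [PySem.List.pyGetD, PySem.List.pyGet?_of_nonneg (h := hs), List.getD_eq_getElem?_getD]
    rw [hget]
    have hre : s + (((k : Nat) + 1 : Nat) : Int) = (s + 1) + (k : Int) := by push_cast; ring
    rw [hre, ih (s + 1) (by omega)]
    have ht : (s + 1).toNat = s.toNat + 1 := by omega
    rw [ht]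
    by_cases h : l[s.toNat]?.getD 0 = 255
    · simp [List.getD_eq_getElem?_getD, h]
    · simp [List.getD_eq_getElem?_getD, h]

-- running partial counts appended after the seed [0]
def pvSums (c : Int) : List Int → List Int
  | [] => []
  | b :: r => (c + if b = 255 then 1 else 0) :: pvSums (c + if b = 255 then 1 else 0) r

theorem pvPrefix_foldl (l : List Int) : ∀ (acc : List Int) (c : Int),
    l.foldl (fun acc b => acc ++ [PySem.List.pyGetD acc (-1) 0 + (if b = 255 then 1 else 0)]) (acc ++ [c])
      = acc ++ [c] ++ pvSums c l := by
  induction l with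
  | nil => intro acc c; simp [pvSums]
  | cons b r ih =>
    intro acc c
    simp only [List.foldl_cons, pvSums]
    rw [PySem.List.pyGetD_neg_one_append_singleton]
    have := ih (acc ++ [c]) (c + if b = 255 then 1 else 0)
    simp only [List.append_assoc] at this ⊢
    exact this

theorem pvPrefix_eq (l : List Int) : pvPrefix l = [0] ++ pvSums 0 l := by
  have := pvPrefix_foldl l [] 0
  simpa [pvPrefix] using this

-- element j of the running counts = c + number of 255s among the first j+1 bytes
theorem pvSums_get (l : List Int) : ∀ (c : Int) (j : Nat), j < l.length →
    (pvSums c l)[j]? = some (c + (((l.take (j + 1)).countP (fun b => b == 255) : Nat) : Int)) := by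
  induction l with
  | nil => intro c j h; simp at h
  | cons b r ih =>
    intro c j h
    cases j with
    | zero =>
      by_cases hb : b = 255 <;> simp [pvSums, hb]
    | succ j =>
      have hih := ih (c + if b = 255 then 1 else 0) j (by simpa using Nat.lt_of_succ_lt_succ h)
      simp only [pvSums, List.getElem?_cons_succ, hih, List.take_succ_cons, List.countP_cons]
      by_cases hb : b = 255
      · simp [hb]; ring
      · simp [hb]

-- pyGetD into the prefix table, for an in-range nonnegative index
theorem pvPrefix_get (l : List Int) (i : Int) (h0 : 0 ≤ i) (hn : i ≤ (l.length : Int)) :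
    PySem.List.pyGetD (pvPrefix l) i 0
      = (((l.take i.toNat).countP (fun b => b == 255) : Nat) : Int) := by
  rw [pvPrefix_eq]
  have hget : PySem.List.pyGetD ([0] ++ pvSums 0 l) i 0
      = (([0] ++ pvSums 0 l)[i.toNat]?).getD 0 := by
    simp [PySem.List.pyGetD, PySem.List.pyGet?_of_nonneg (h := h0)]
  rw [hget]
  rcases Nat.eq_zero_or_pos i.toNat with hz | hpos
  · simp [hz]
  · have hlt : i.toNat - 1 < l.length := by omega
    have hcons : ([0] ++ pvSums 0 l)[i.toNat]? = (pvSums 0 l)[i.toNat - 1]? := by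
      rcases Nat.exists_eq_add_of_lt hpos with ⟨m, hm⟩
      simp [show i.toNat = m + 1 by omega]
    rw [hcons, pvSums_get l 0 (i.toNat - 1) hlt]
    simp [show i.toNat - 1 + 1 = i.toNat by omega]

-- the O(1) prefix-difference window test agrees with A's window scan on every candidate
theorem cond_eq (l : List Int) (s : Int) (h0 : 0 ≤ s) (hlt : s < (l.length : Int) - 32) :
    (PySem.List.pyGetD (pvPrefix l) (s + 31) 0 - PySem.List.pyGetD (pvPrefix l) s 0 = 31)
      ↔ winF l s.toNat 31 = true := by
  have hlen : s.toNat + 33 ≤ l.length := by omega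
  rw [pvPrefix_get l (s + 31) (by omega) (by omega), pvPrefix_get l s h0 (by omega)]
  have hts : (s + 31).toNat = s.toNat + 31 := by omega
  rw [hts]
  have htake : l.take (s.toNat + 31) = l.take s.toNat ++ (l.drop s.toNat).take 31 :=
    List.take_add ..
  have hseglen : ((l.drop s.toNat).take 31).length = 31 := by simp; omega
  rw [htake, List.countP_append]
  have hdiff : ((((l.take s.toNat).countP (fun b => b == 255)
        + ((l.drop s.toNat).take 31).countP (fun b => b == 255) : Nat) : Int)
      - (((l.take s.toNat).countP (fun b => b == 255) : Nat) : Int) = 31)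
      ↔ ((l.drop s.toNat).take 31).countP (fun b => b == 255) = 31 := by
    constructor
    · intro h; omega
    · intro h; rw [h]; push_cast; ring
  rw [hdiff]
  have hcnt : ((l.drop s.toNat).take 31).countP (fun b => b == 255) = 31
      ↔ ∀ a ∈ (l.drop s.toNat).take 31, a = 255 := by
    have := List.countP_eq_length (p := fun b => b == 255) (l := (l.drop s.toNat).take 31)
    rw [hseglen] at this
    simpa using this
  rw [hcnt, winF_iff]
  constructor
  · intro h j hj
    have hjlt : j < ((l.drop s.toNat).take 31).length := by omega
    have hjl : s.toNat + j < l.length := by omega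
    have hsegj : ((l.drop s.toNat).take 31)[j]'hjlt = l[s.toNat + j]'hjl := by
      simp [List.getElem_take, List.getElem_drop]
    have := h _ (List.getElem_mem hjlt)
    rw [hsegj] at this
    rw [List.getD_eq_getElem?_getD, List.getElem?_eq_getElem hjl]
    simpa using this
  · intro h a ha
    rcases List.mem_iff_getElem.mp ha with ⟨j, hj, rfl⟩
    have hj31 : j < 31 := by omega
    have hjl : s.toNat + j < l.length := by omega
    have hsegj : ((l.drop s.toNat).take 31)[j]'hj = l[s.toNat + j]'hjl := by
      simp [List.getElem_take, List.getElem_drop]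
    rw [hsegj]
    have := h j hj31
    rwa [List.getD_eq_getElem?_getD, List.getElem?_eq_getElem hjl] at this

-- the two outer loops agree when their window tests agree on every candidate of the range
theorem loops_eq (l pre : List Int) (r : List Int)
    (h : ∀ s ∈ r, (PySem.List.pyGetD pre (s + 31) 0 - PySem.List.pyGetD pre s 0 = 31)
        ↔ pvA_inner l (PySem.List.pyRange s (s + 31) 1) = true) :
    ∀ last : Int, pvA_loop l last r = pvB_loop pre last r := by
  induction r with
  | nil => intro last; rfl
  | cons s rest ih =>
    intro last
    simp only [pvA_loop, pvB_loop]
    have hs := h s (List.mem_cons_self ..)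
    by_cases hc : pvA_inner l (PySem.List.pyRange s (s + 31) 1) = true
    · rw [if_pos hc, if_pos (hs.mpr hc)]
    · rw [if_neg (by simpa using hc), if_neg (fun hx => hc (hs.mp hx))]
      exact ih (fun u hu => h u (List.mem_cons_of_mem _ hu)) s

-- ===== VERDICT (by name: the statement is the Claim_ definition above) =====
theorem stripBitFileHeader_spec : Claim_equal_stripBitFileHeader := by
  intro l _
  unfold Spec_stripBitFileHeader
  unfold stripBitFileHeader stripBitFileHeader_alt
  rw [loops_eq l (pvPrefix l) _ ?_]
  intro s hs
  rw [PySem.List.len_eq] at hs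
  have hmem := (PySem.List.mem_pyRange_one (a := 0) (b := (l.length : Int) - 32) (x := s)).mp hs
  rw [cond_eq l s (by omega) (by omega)]
  have hA := pvA_inner_eq l 31 s (by omega)
  norm_num at hA
  rw [hA]
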